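-- pv_equiv track=rewrite | github.com/csams/squerly | squerly/models/systemctl/unit_files.py | parse
-- ===== SOURCE A (Python) =====
-- def parse(content):
--     columns = ["unit_file", "state"]
--     results = []
--     for line in content[1:]:
--         line = line.strip()
--         if not line:
--             break
--         row = dict(zip(columns, line.split(None, 1)))
--         results.append(row)
--     return results
-- ===== SOURCE B (Python) =====
-- def parse(content):
--     stripped = [line.strip() for line in content[1:]]
--     try:
--         end = stripped.index('')
--     except ValueError:
--         end = len(stripped)
--     return [dict(zip(["unit_file", "state"], s.split(None, 1)))
--             for s in stripped[:end]]
-- ===== Notes on version B (the rewrite author's own statement) =====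
-- stated objective: alternative
-- what changed: Replaces A's single break-on-blank loop by three passes: strip every line once, locate the first blank via list.index, slice the prefix, then map each line to its row with a comprehension.
import Mathlib
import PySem

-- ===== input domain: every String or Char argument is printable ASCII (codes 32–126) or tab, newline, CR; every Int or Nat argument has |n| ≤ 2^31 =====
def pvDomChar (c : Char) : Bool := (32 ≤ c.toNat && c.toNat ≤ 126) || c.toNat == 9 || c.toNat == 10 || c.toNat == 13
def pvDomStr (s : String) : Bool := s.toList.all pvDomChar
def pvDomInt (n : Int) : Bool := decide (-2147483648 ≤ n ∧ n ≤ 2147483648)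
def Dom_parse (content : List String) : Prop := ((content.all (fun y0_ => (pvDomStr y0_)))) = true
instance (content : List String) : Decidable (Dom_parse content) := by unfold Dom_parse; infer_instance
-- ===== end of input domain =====

-- B restructures A's break-on-blank loop into strip-all / find-first-blank / slice / map passes; objective: alternative decomposition.

-- ===== PORT A =====
-- A's for-loop with break, as structural recursion over content[1:]
def parseLoopA : List String → List (List (String × String))
  | [] => []
  | l :: rest =>
    let line := PySem.Str.strip l
    if line = "" then []
    else (List.zip ["unit_file", "state"] (PySem.Str.split₀Max line 1)) :: parseLoopA rest

def parse (content : List String) : List (List (String × String)) :=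
  parseLoopA (PySem.List.slice content (some 1) none)

-- ===== PORT B =====
def rowOf (s : String) : List (String × String) :=
  List.zip ["unit_file", "state"] (PySem.Str.split₀Max s 1)

def parse_alt (content : List String) : List (List (String × String)) :=
  let stripped := (PySem.List.slice content (some 1) none).map PySem.Str.strip
  let e := (PySem.List.index? stripped "").getD stripped.length
  (stripped.take e).map rowOf

-- ===== PRECONDITION & SPEC =====
def Spec_parse (content : List String) (out : List (List (String × String))) : Prop := out = parse_alt content
instance (content : List String) (out : List (List (String × String))) : Decidable (Spec_parse content out) := by unfold Spec_parse; infer_instance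

-- ===== CLAIM (what is proved, stated in full; the proofs are below) =====
def Claim_equal_parse : Prop := ∀ (content : List String), Dom_parse content → Spec_parse content (parse content)

-- ===== LEMMAS AND PROOFS =====
theorem parseLoopA_eq (ls : List String) :
    parseLoopA ls =
      (((ls.map PySem.Str.strip).take
        ((PySem.List.index? (ls.map PySem.Str.strip) "").getD (ls.map PySem.Str.strip).length)).map rowOf) := by
  induction ls with
  | nil => simp [parseLoopA]
  | cons l rest ih =>
    by_cases h : PySem.Str.strip l = ""
    · simp only [parseLoopA, h, if_true, List.map_cons,
        PySem.List.index?_cons_self, Option.getD_some, List.take_zero, List.map_nil]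
    · simp only [parseLoopA, if_neg h, List.map_cons,
        PySem.List.index?_cons_of_ne _ h, ih]
      cases hix : PySem.List.index? (rest.map PySem.Str.strip) "" <;>
        simp [List.take_succ_cons, rowOf]

-- ===== VERDICT (by name: the statement is the Claim_ definition above) =====
theorem parse_spec : Claim_equal_parse := by
  intro content _
  unfold Spec_parse parse parse_alt
  exact parseLoopA_eq _
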